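-- pv_equiv track=rewrite | github.com/thierryxdp/TCC | problems/824/solution_115049.py | uppCos
-- ===== SOURCE A (Python) =====
-- def uppCos(frase):
--     indice=0
--     UC=""
--     while indice <= (len(frase)-1):
--         if frase[indice] in "BCDFGHJKLMNPQRSTVXYWZbcdfghjklmnpqrstvxywz":
--             UC= UC + frase[indice].upper()
--         else:
--             UC=UC +frase[indice]
--         indice= indice + 1
--     return UC
-- ===== SOURCE B (Python) =====
-- def uppCos(frase):
--     table = {ord(c): c.upper() for c in "bcdfghjklmnpqrstvxywz"}
--     return frase.translate(table)
-- ===== Notes on version B (the rewrite author's own statement) =====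
-- stated objective: faster
-- what changed: Replaces the explicit index-while loop with per-character membership test and quadratic string concatenation by a precomputed code-point-to-uppercase translation table applied in one pass via str.translate.
import Mathlib
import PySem

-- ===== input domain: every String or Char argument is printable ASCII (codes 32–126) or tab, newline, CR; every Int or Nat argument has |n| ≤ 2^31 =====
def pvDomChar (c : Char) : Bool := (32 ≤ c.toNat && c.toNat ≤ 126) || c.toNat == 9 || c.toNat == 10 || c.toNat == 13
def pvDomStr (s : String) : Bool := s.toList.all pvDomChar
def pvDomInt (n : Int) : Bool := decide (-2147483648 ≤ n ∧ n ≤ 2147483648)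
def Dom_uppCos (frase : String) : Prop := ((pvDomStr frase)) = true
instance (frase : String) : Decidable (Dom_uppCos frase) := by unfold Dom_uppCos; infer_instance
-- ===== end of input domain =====

-- B replaces A's index loop with a membership branch by a precomputed code-point → uppercase
-- translation table applied in one pass (Python str.translate); return values agree on Dom.

-- ===== PORT A =====
def uppCosCons : List Char := "BCDFGHJKLMNPQRSTVXYWZbcdfghjklmnpqrstvxywz".toList

-- the while loop: indice, UC as in A; frase[indice] is in range whenever the loop guard holds
def uppCosGo (cs : List Char) (indice : Int) (UC : List Char) : List Char :=
  if _h : indice ≤ (cs.length : Int) - 1 then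
    match PySem.List.pyGet? cs indice with
    | some c =>
        if PySem.Chars.isIn [c] uppCosCons then
          uppCosGo cs (indice + 1) (UC ++ PySem.Chars.upper [c])
        else
          uppCosGo cs (indice + 1) (UC ++ [c])
    | none => UC   -- unreachable for 0 ≤ indice ≤ len-1
  else UC
termination_by ((cs.length : Int) - indice).toNat
decreasing_by all_goals omega

def uppCos (frase : String) : String := String.ofList (uppCosGo frase.toList 0 [])

-- ===== PORT B =====
-- table = {ord(c): c.upper() for c in "bcdfghjklmnpqrstvxywz"}  (each value is a single character)
def uppCosTable : PySem.Dict Int Char :=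
  "bcdfghjklmnpqrstvxywz".toList.foldl
    (fun d c => d.insert (c.toNat : Int) (PySem.Chars.upperChar c)) PySem.Dict.empty

-- frase.translate(table), ported by hand (exact here: every table value is one character):
-- each character is looked up by code point and replaced, unmapped characters pass through.
def uppCos_alt (frase : String) : String :=
  String.ofList (frase.toList.map (fun c => ((uppCosTable.get? (c.toNat : Int)).getD c)))

-- ===== PRECONDITION & SPEC =====
def Spec_uppCos (frase : String) (out : String) : Prop := out = uppCos_alt frase
instance (frase : String) (out : String) : Decidable (Spec_uppCos frase out) := by unfold Spec_uppCos; infer_instance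

-- ===== CLAIM (what is proved, stated in full; the proofs are below) =====
def Claim_equal_uppCos : Prop := ∀ (frase : String), Dom_uppCos frase → Spec_uppCos frase (uppCos frase)

-- ===== LEMMAS AND PROOFS =====
-- A's per-character action
def uppStepA (c : Char) : Char :=
  if PySem.Chars.isIn [c] uppCosCons then PySem.Chars.upperChar c else c

-- B's per-character action
def uppStepB (c : Char) : Char := (uppCosTable.get? (c.toNat : Int)).getD c

lemma uppCosGo_eq (cs : List Char) : ∀ (k : Nat) (UC : List Char),
    uppCosGo cs (k : Int) UC = UC ++ (cs.drop k).map uppStepA := by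
  have H : ∀ (n k : Nat) (UC : List Char), cs.length - k ≤ n →
      uppCosGo cs (k : Int) UC = UC ++ (cs.drop k).map uppStepA := by
    intro n
    induction n with
    | zero =>
      intro k UC h
      rw [uppCosGo, dif_neg (by omega), List.drop_eq_nil_of_le (by omega)]
      simp
    | succ n ih =>
      intro k UC h
      by_cases hk : k < cs.length
      · rw [uppCosGo, dif_pos (by omega)]
        rw [PySem.List.pyGet?_natCast]
        rw [List.getElem?_eq_getElem hk]
        dsimp only
        have hcast : ((k : Int) + 1) = ((k + 1 : Nat) : Int) := by push_cast; ring
        have hdrop : cs.drop k = cs[k] :: cs.drop (k + 1) := List.drop_eq_getElem_cons hk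
        by_cases hc : PySem.Chars.isIn [cs[k]] uppCosCons
        · rw [if_pos hc, hcast, ih (k + 1) _ (by omega), hdrop, List.map_cons]
          simp only [uppStepA, if_pos hc, PySem.Chars.upper, List.map, List.append_assoc,
            List.singleton_append]
        · rw [if_neg hc, hcast, ih (k + 1) _ (by omega), hdrop, List.map_cons]
          simp only [uppStepA, if_neg hc, List.append_assoc, List.singleton_append]
      · rw [uppCosGo, dif_neg (by omega), List.drop_eq_nil_of_le (by omega)]
        simp
  intro k UC
  exact H (cs.length - k) k UC le_rfl

set_option maxRecDepth 4096 in
lemma uppStep_eq (c : Char) (h : pvDomChar c = true) : uppStepA c = uppStepB c := by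
  have h127 : c.toNat < 127 := by
    simp only [pvDomChar, Bool.or_eq_true, Bool.and_eq_true, decide_eq_true_eq, beq_iff_eq] at h
    omega
  have hall : ∀ n ∈ List.range 127, uppStepA (Char.ofNat n) = uppStepB (Char.ofNat n) := by decide
  have := hall c.toNat (List.mem_range.mpr h127)
  rwa [Char.ofNat_toNat] at this

-- ===== VERDICT (by name: the statement is the Claim_ definition above) =====
theorem uppCos_spec : Claim_equal_uppCos := by
  intro frase hdom
  unfold Spec_uppCos uppCos uppCos_alt
  rw [show (0 : Int) = ((0 : Nat) : Int) from rfl, uppCosGo_eq]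
  simp only [List.drop_zero, List.nil_append]
  congr 1
  apply List.map_congr_left
  intro c hc
  have : pvDomChar c = true := by
    unfold Dom_uppCos pvDomStr at hdom
    exact List.all_eq_true.mp hdom c hc
  exact uppStep_eq c this
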